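-- pv_equiv track=rewrite | github.com/ayye79-wq/HornUpdates | update_articles.py | merge_dedupe
-- ===== SOURCE A (Python) =====
-- MAX_ARTICLES = 200
--
-- def merge_dedupe(old_list, new_list):
--     merged = []
--     seen = set()
--
--     for a in new_list + old_list:
--         key = (a.get("source_url") or a.get("link") or "").strip()
--         if not key:
--             key = (a.get("title", "") + "|" + a.get("published_at", "")).strip()
--         if key in seen:
--             continue
--         seen.add(key)
--         merged.append(a)
--
--     merged.sort(key=lambda x: x.get("published_at", ""), reverse=True)
--     return merged[:MAX_ARTICLES]
-- ===== SOURCE B (Python) =====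
-- MAX_ARTICLES = 200
--
-- def merge_dedupe(old_list, new_list):
--     def key_of(a):
--         k = (a.get("source_url") or a.get("link") or "").strip()
--         if not k:
--             k = (a.get("title", "") + "|" + a.get("published_at", "")).strip()
--         return k
--
--     # one online pass: keep `ranked` sorted newest-first at all times (no sort call);
--     # inserting each fresh article after all entries with an equal-or-newer date
--     # reproduces the stable reverse sort's tie order.
--     ranked = []
--     seen = set()
--     for a in new_list + old_list:
--         k = key_of(a)
--         if k in seen:
--             continue
--         seen.add(k)
--         d = a.get("published_at", "")
--         i = 0
--         while i < len(ranked) and ranked[i].get("published_at", "") >= d: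
--             i += 1
--         ranked.insert(i, a)
--     return ranked[:MAX_ARTICLES]
-- ===== Notes on version B (the rewrite author's own statement) =====
-- stated objective: alternative
-- what changed: B never calls sort: it maintains the result as an incrementally sorted list, inserting each non-duplicate article after all entries with an equal-or-newer published_at during the single dedup pass (online insertion sort fused with dedup), then caps; A collects first, then does a stable reverse sort plus slice.
import Mathlib
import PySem

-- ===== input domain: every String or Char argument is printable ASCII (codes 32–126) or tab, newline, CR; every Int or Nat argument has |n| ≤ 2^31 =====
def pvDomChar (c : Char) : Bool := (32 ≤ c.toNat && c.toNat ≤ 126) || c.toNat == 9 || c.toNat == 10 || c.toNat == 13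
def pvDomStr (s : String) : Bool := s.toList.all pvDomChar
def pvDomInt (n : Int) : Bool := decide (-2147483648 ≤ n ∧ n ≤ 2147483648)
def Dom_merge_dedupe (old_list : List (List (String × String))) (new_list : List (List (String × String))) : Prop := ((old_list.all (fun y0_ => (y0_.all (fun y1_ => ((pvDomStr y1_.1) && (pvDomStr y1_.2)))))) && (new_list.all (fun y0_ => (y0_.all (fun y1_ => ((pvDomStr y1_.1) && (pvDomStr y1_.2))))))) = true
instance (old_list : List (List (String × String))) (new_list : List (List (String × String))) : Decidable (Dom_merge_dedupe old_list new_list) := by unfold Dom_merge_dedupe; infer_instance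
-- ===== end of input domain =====

-- B replaces A's collect-then-sort with a single pass that keeps the result list sorted
-- newest-first by online insertion while deduping (objective: alternative; return value only).

-- ===== PORT A =====
def merge_dedupe (old_list : List (List (String × String))) (new_list : List (List (String × String))) : List (List (String × String)) :=
  let ms := (new_list ++ old_list).foldl
    (fun (ms : List (List (String × String)) × PySem.Set String) a =>
      let d := PySem.Dict.mk a
      -- (a.get("source_url") or a.get("link") or "").strip()
      let key0 := PySem.Str.strip
        (match d.get? "source_url" with
         | some v => if v ≠ "" then v else
             (match d.get? "link" with
              | some w => if w ≠ "" then w else ""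
              | none => "")
         | none =>
             (match d.get? "link" with
              | some w => if w ≠ "" then w else ""
              | none => ""))
      let key := if key0 = "" then
          PySem.Str.strip (d.getD "title" "" ++ "|" ++ d.getD "published_at" "")
        else key0
      if ms.2.contains key then ms
      else (ms.1 ++ [a], ms.2.add key))
    ([], PySem.Set.empty)
  let merged := PySem.List.sorted ms.1 (fun x => (PySem.Dict.mk x).getD "published_at" "") true
  PySem.List.slice merged none (some 200)

-- ===== PORT B =====
def keyOf (a : List (String × String)) : String :=
  let d := PySem.Dict.mk a
  let k0 := PySem.Str.strip
    (match d.get? "source_url" with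
     | some v => if v ≠ "" then v else
         (match d.get? "link" with
          | some w => if w ≠ "" then w else ""
          | none => "")
     | none =>
         (match d.get? "link" with
          | some w => if w ≠ "" then w else ""
          | none => ""))
  if k0 = "" then
    PySem.Str.strip ((PySem.Dict.mk a).getD "title" "" ++ "|" ++ (PySem.Dict.mk a).getD "published_at" "")
  else k0

-- the while-loop "skip while ranked[i].published_at >= d, then insert" as structural recursion
def insertDesc (a : List (String × String)) : List (List (String × String)) → List (List (String × String))
  | [] => [a]
  | x :: xs =>
    if (PySem.Dict.mk a).getD "published_at" "" ≤ (PySem.Dict.mk x).getD "published_at" "" then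
      x :: insertDesc a xs
    else a :: x :: xs

def merge_dedupe_alt (old_list : List (List (String × String))) (new_list : List (List (String × String))) : List (List (String × String)) :=
  let rs := (new_list ++ old_list).foldl
    (fun (rs : List (List (String × String)) × PySem.Set String) a =>
      let k := keyOf a
      if rs.2.contains k then rs
      else (insertDesc a rs.1, rs.2.add k))
    ([], PySem.Set.empty)
  PySem.List.slice rs.1 none (some 200)

-- ===== PRECONDITION & SPEC =====
def Spec_merge_dedupe (old_list : List (List (String × String))) (new_list : List (List (String × String))) (out : List (List (String × String))) : Prop := out = merge_dedupe_alt old_list new_list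
instance (old_list : List (List (String × String))) (new_list : List (List (String × String))) (out : List (List (String × String))) : Decidable (Spec_merge_dedupe old_list new_list out) := by unfold Spec_merge_dedupe; infer_instance

-- ===== CLAIM (what is proved, stated in full; the proofs are below) =====
def Claim_equal_merge_dedupe : Prop := ∀ (old_list : List (List (String × String))) (new_list : List (List (String × String))), Dom_merge_dedupe old_list new_list → Spec_merge_dedupe old_list new_list (merge_dedupe old_list new_list)

-- ===== LEMMAS AND PROOFS =====

-- B's while-loop insertion is PySem's insertBy with the reverse-sort predicate
theorem insertDesc_eq_insertBy (a : List (String × String)) (ys : List (List (String × String))) :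
    insertDesc a ys = PySem.List.insertBy
      (fun p q => decide ((PySem.Dict.mk q).getD "published_at" "" < (PySem.Dict.mk p).getD "published_at" "")) a ys := by
  induction ys with
  | nil => rfl
  | cons x xs ih =>
    rw [insertDesc, PySem.List.insertBy]
    by_cases h : (PySem.Dict.mk a).getD "published_at" "" ≤ (PySem.Dict.mk x).getD "published_at" ""
    · rw [if_pos h, if_neg (by simpa using not_lt.mpr h), ih]
    · rw [if_neg h, if_pos (by simpa using not_le.mp h)]

-- the fused fold of B equals A's dedup fold followed by the insertBy fold (= the stable reverse sort)
theorem fused_eq (items : List (List (String × String)))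
    (m r : List (List (String × String))) (s : PySem.Set String)
    (hr : r = m.foldl (fun acc x => PySem.List.insertBy
      (fun p q => decide ((PySem.Dict.mk q).getD "published_at" "" < (PySem.Dict.mk p).getD "published_at" "")) x acc) []) :
    (items.foldl
      (fun (rs : List (List (String × String)) × PySem.Set String) a =>
        if rs.2.contains (keyOf a) then rs
        else (insertDesc a rs.1, rs.2.add (keyOf a)))
      (r, s)).1
    = ((items.foldl
        (fun (ms : List (List (String × String)) × PySem.Set String) a =>
          if ms.2.contains (keyOf a) then ms
          else (ms.1 ++ [a], ms.2.add (keyOf a)))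
        (m, s)).1).foldl (fun acc x => PySem.List.insertBy
          (fun p q => decide ((PySem.Dict.mk q).getD "published_at" "" < (PySem.Dict.mk p).getD "published_at" "")) x acc) [] := by
  induction items generalizing m r s with
  | nil => simpa using hr
  | cons a rest ih =>
    simp only [List.foldl_cons]
    by_cases h : s.contains (keyOf a) = true
    · rw [if_pos h, if_pos h]
      exact ih m r s hr
    · rw [if_neg h, if_neg h]
      refine ih (m ++ [a]) (insertDesc a r) (s.add (keyOf a)) ?_
      rw [List.foldl_append, ← hr, List.foldl_cons, List.foldl_nil, insertDesc_eq_insertBy]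

-- ===== VERDICT (by name: the statement is the Claim_ definition above) =====
theorem merge_dedupe_spec : Claim_equal_merge_dedupe := by
  intro old_list new_list _
  unfold Spec_merge_dedupe
  have h := fused_eq (new_list ++ old_list) [] [] PySem.Set.empty rfl
  simp only [merge_dedupe, merge_dedupe_alt, keyOf, PySem.List.sorted_rev_eq_foldl_insertBy] at h ⊢
  rw [h]
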